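-- pv_equiv track=rewrite | github.com/wickai/fibonacci_wave_2d | claw_research/find_sequence_coefficients.py | verify_coefficients
-- ===== SOURCE A (Python) =====
-- from typing import Tuple, List, Optional, Dict
--
-- def generate_sequence(start_a: int, start_b: int, m: int, length: int = None) -> List[Tuple[int, int]]:
--     """Generate a sequence starting with (start_a, start_b) modulo m."""
--     if length is None:
--         # Find the period
--         seen = {}
--         a, b = start_a % m, start_b % m
--         n = 0
--         while (a, b) not in seen:
--             seen[(a, b)] = n
--             a, b = b, (a + b) % m
--             n += 1
--         length = n
--
--     seq = []
--     a, b = start_a % m, start_b % m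
--     for _ in range(length):
--         seq.append((a, b))
--         a, b = b, (a + b) % m
--     return seq
--
-- def verify_coefficients(m: int, gen_a: int, gen_b: int, start_i: int, start_j: int,
--                         coeff_x: int, coeff_y: int, seq_length: int = 20) -> bool:
--     """Verify that the coefficients produce the correct sequence."""
--     D = generate_sequence(1, gen_a, m, seq_length)
--     C = generate_sequence(1, gen_b, m, seq_length)
--     S = generate_sequence(start_i, start_j, m, seq_length)
--
--     for n in range(seq_length):
--         expected = S[n]
--         # coeff_x * D_n + coeff_y * C_n
--         actual = ((coeff_x * D[n][0] + coeff_y * C[n][0]) % m,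
--                   (coeff_x * D[n][1] + coeff_y * C[n][1]) % m)
--         if expected != actual:
--             return False
--     return True
-- ===== SOURCE B (Python) =====
-- def verify_coefficients(m: int, gen_a: int, gen_b: int, start_i: int, start_j: int,
--                         coeff_x: int, coeff_y: int, seq_length: int = 20) -> bool:
--     """O(1) closed form: the error sequence e_n = (S_n - coeff_x*D_n - coeff_y*C_n) mod m
--     obeys the same Fibonacci-style recurrence as the three sequences, so it vanishes on
--     every prefix iff its first two terms vanish.  No sequences are generated at all."""
--     if seq_length <= 0:
--         return True
--     return ((start_i - coeff_x - coeff_y) % m == 0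
--             and (start_j - coeff_x * gen_a - coeff_y * gen_b) % m == 0)
-- ===== Notes on version B (the rewrite author's own statement) =====
-- stated objective: faster
-- what changed: B replaces A's loop entirely by an O(1) closed form: since the error sequence (S_n - coeff_x*D_n - coeff_y*C_n) mod m obeys the same Fibonacci-style recurrence, it vanishes on the whole prefix iff its first two terms vanish, so B just tests the two initial residues (and returns True for seq_length <= 0).
import Mathlib
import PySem

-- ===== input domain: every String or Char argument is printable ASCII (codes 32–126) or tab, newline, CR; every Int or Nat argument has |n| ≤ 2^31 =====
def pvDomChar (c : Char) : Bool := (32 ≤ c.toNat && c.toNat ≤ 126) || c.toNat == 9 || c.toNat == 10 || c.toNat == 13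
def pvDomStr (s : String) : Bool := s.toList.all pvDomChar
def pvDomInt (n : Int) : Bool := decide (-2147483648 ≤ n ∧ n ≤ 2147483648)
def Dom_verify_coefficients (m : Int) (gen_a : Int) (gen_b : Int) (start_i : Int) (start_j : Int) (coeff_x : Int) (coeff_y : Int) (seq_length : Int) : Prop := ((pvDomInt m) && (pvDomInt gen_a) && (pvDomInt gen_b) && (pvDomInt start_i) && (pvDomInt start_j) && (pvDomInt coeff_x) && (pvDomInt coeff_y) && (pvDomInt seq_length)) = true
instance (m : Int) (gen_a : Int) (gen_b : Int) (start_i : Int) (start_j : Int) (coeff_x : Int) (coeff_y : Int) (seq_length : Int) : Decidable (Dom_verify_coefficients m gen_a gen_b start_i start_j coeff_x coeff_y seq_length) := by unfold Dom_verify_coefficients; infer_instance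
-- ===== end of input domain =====

-- B drops the loop and the three generated sequences entirely: the error sequence
-- (S_n - coeff_x*D_n - coeff_y*C_n) mod m obeys the same recurrence as the sequences, so it is
-- zero on the whole prefix iff its first two terms are zero — an O(1) two-residue test.

-- ===== PORT A =====
-- generate_sequence's for-loop (after the initial a%m, b%m reduction), appending (a,b) then stepping.
def pvGenLoop (a b m : Int) (seq : Array (Int × Int)) : Nat → Array (Int × Int)
  | 0 => seq
  | k + 1 => pvGenLoop b (PySem.Int.mod (a + b) m) m (seq.push (a, b)) k
-- generate_sequence with an explicit length (the 'length is None' period-finding branch is never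
-- taken by verify_coefficients, which always passes seq_length, so it is not ported).
def generate_sequence (start_a start_b m length : Int) : List (Int × Int) :=
  (pvGenLoop (PySem.Int.mod start_a m) (PySem.Int.mod start_b m) m #[] length.toNat).toList
-- the 'for n in range(seq_length)' comparison loop of verify_coefficients, indexing S/D/C at n
def pvCheckLoop (S D C : List (Int × Int)) (m cx cy : Int) : List Int → Bool
  | [] => true
  | n :: rest =>
    match PySem.List.pyGet? S n, PySem.List.pyGet? D n, PySem.List.pyGet? C n with
    | some (sa, sb), some (da, db), some (ca, cb) =>
      if (sa, sb) ≠ (PySem.Int.mod (cx * da + cy * ca) m, PySem.Int.mod (cx * db + cy * cb) m)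
      then false else pvCheckLoop S D C m cx cy rest
    | _, _, _ => false   -- IndexError; unreachable: n < seq_length = length of each list

def verify_coefficients (m : Int) (gen_a : Int) (gen_b : Int) (start_i : Int) (start_j : Int) (coeff_x : Int) (coeff_y : Int) (seq_length : Int) : Bool :=
  pvCheckLoop (generate_sequence start_i start_j m seq_length)
    (generate_sequence 1 gen_a m seq_length) (generate_sequence 1 gen_b m seq_length)
    m coeff_x coeff_y (PySem.List.pyRange 0 seq_length 1)

-- ===== PORT B =====
-- Source B: early True for seq_length <= 0, else the two initial residue tests
def verify_coefficients_alt (m : Int) (gen_a : Int) (gen_b : Int) (start_i : Int) (start_j : Int) (coeff_x : Int) (coeff_y : Int) (seq_length : Int) : Bool :=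
  if seq_length ≤ 0 then true
  else decide (PySem.Int.mod (start_i - coeff_x - coeff_y) m = 0)
       && decide (PySem.Int.mod (start_j - coeff_x * gen_a - coeff_y * gen_b) m = 0)

-- ===== PRECONDITION & SPEC =====
-- Pre_ excludes m = 0, on which the Python A raises ZeroDivisionError (inside generate_sequence's
-- initial '% m' reduction, for every seq_length).
def Pre_verify_coefficients (m : Int) (gen_a : Int) (gen_b : Int) (start_i : Int) (start_j : Int) (coeff_x : Int) (coeff_y : Int) (seq_length : Int) : Prop := m ≠ 0
instance (m : Int) (gen_a : Int) (gen_b : Int) (start_i : Int) (start_j : Int) (coeff_x : Int) (coeff_y : Int) (seq_length : Int) : Decidable (Pre_verify_coefficients m gen_a gen_b start_i start_j coeff_x coeff_y seq_length) := by unfold Pre_verify_coefficients; infer_instance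
def pvWitness_verify_coefficients : Int × Int × Int × Int × Int × Int × Int × Int := (7, 2, 3, 1, 4, 2, 5, 6)

def Spec_verify_coefficients (m : Int) (gen_a : Int) (gen_b : Int) (start_i : Int) (start_j : Int) (coeff_x : Int) (coeff_y : Int) (seq_length : Int) (out : Bool) : Prop := out = verify_coefficients_alt m gen_a gen_b start_i start_j coeff_x coeff_y seq_length
instance (m : Int) (gen_a : Int) (gen_b : Int) (start_i : Int) (start_j : Int) (coeff_x : Int) (coeff_y : Int) (seq_length : Int) (out : Bool) : Decidable (Spec_verify_coefficients m gen_a gen_b start_i start_j coeff_x coeff_y seq_length out) := by unfold Spec_verify_coefficients; infer_instance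

-- ===== CLAIM =====
def Claim_equal_verify_coefficients : Prop := ∀ (m : Int) (gen_a : Int) (gen_b : Int) (start_i : Int) (start_j : Int) (coeff_x : Int) (coeff_y : Int) (seq_length : Int), Dom_verify_coefficients m gen_a gen_b start_i start_j coeff_x coeff_y seq_length → Pre_verify_coefficients m gen_a gen_b start_i start_j coeff_x coeff_y seq_length → Spec_verify_coefficients m gen_a gen_b start_i start_j coeff_x coeff_y seq_length (verify_coefficients m gen_a gen_b start_i start_j coeff_x coeff_y seq_length)

-- ===== LEMMAS AND PROOFS =====

-- proof helper: the fused lockstep view of A's indexed comparison loop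
def pvFusedLoop (m cx cy : Int) (d c s : Int × Int) : Nat → Bool
  | 0 => true
  | k + 1 =>
    if (s.1, s.2) ≠ (PySem.Int.mod (cx * d.1 + cy * c.1) m, PySem.Int.mod (cx * d.2 + cy * c.2) m)
    then false
    else pvFusedLoop m cx cy (d.2, PySem.Int.mod (d.1 + d.2) m) (c.2, PySem.Int.mod (c.1 + c.2) m)
           (s.2, PySem.Int.mod (s.1 + s.2) m) k

-- cons-style characterization of pvGenLoop
def pvGenList (a b m : Int) : Nat → List (Int × Int)
  | 0 => []
  | k + 1 => (a, b) :: pvGenList b (PySem.Int.mod (a + b) m) m k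

theorem pvGenLoop_toList (m : Int) : ∀ (k : Nat) (a b : Int) (seq : Array (Int × Int)),
    (pvGenLoop a b m seq k).toList = seq.toList ++ pvGenList a b m k := by
  intro k
  induction k with
  | zero => intro a b seq; simp [pvGenLoop, pvGenList]
  | succ k ih => intro a b seq; simp [pvGenLoop, pvGenList, ih]

-- Dropping the heads of the three lists shifts every index in the loop down by one.
theorem pvCheckLoop_shift (S D C : List (Int × Int)) (x y z : Int × Int) (m cx cy : Int)
    (ns : List Nat) :
    pvCheckLoop (x :: S) (y :: D) (z :: C) m cx cy (ns.map (fun n => Int.ofNat n + 1))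
      = pvCheckLoop S D C m cx cy (ns.map Int.ofNat) := by
  induction ns with
  | nil => rfl
  | cons n ns ih =>
    simp only [List.map_cons, pvCheckLoop, Int.ofNat_eq_natCast]
    have e1 : ((n : Int) + 1) = ((n + 1 : Nat) : Int) := by push_cast; ring
    rw [e1]
    simp only [PySem.List.pyGet?_natCast, List.getElem?_cons_succ]
    rcases S[n]? with _ | ⟨sa, sb⟩ <;> rcases D[n]? with _ | ⟨da, db⟩ <;>
      rcases C[n]? with _ | ⟨ca, cb⟩ <;> simp_all [Int.ofNat_eq_natCast]

-- Indexing the three freshly generated sequences at 0..k-1 is the fused lockstep pass.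
theorem pvCheckLoop_eq_fused (m cx cy : Int) :
    ∀ (k : Nat) (da db ca cb sa sb : Int),
    pvCheckLoop (pvGenList sa sb m k) (pvGenList da db m k) (pvGenList ca cb m k) m cx cy
        ((List.range k).map Int.ofNat)
      = pvFusedLoop m cx cy (da, db) (ca, cb) (sa, sb) k := by
  intro k
  induction k with
  | zero => intro _ _ _ _ _ _; rfl
  | succ k ih =>
    intro da db ca cb sa sb
    rw [List.range_succ_eq_map]
    have hmap : ((List.range k).map Nat.succ).map Int.ofNat
        = (List.range k).map (fun n => Int.ofNat n + 1) := by
      rw [List.map_map]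
      refine List.map_congr_left (fun n _ => ?_)
      simp only [Function.comp_apply, Int.ofNat_eq_natCast]
      push_cast
      ring
    simp only [List.map_cons, pvGenList]
    rw [hmap]
    have h0 : (Int.ofNat 0) = (0 : Int) := rfl
    rw [h0]
    simp only [pvCheckLoop, PySem.List.pyGet?_zero_cons, pvFusedLoop]
    split
    · rfl
    · rw [pvCheckLoop_shift]
      exact ih db (PySem.Int.mod (da + db) m) cb (PySem.Int.mod (ca + cb) m)
        sb (PySem.Int.mod (sa + sb) m)

-- linear combination of residues collapses: (x*(u%m) + y*(v%m)) % m = (x*u + y*v) % m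
theorem pvFmodLin (x u y v m : Int) :
    (x * u.fmod m + y * v.fmod m).fmod m = (x * u + y * v).fmod m := by
  rw [Int.add_fmod, Int.mul_fmod, Int.fmod_fmod, Int.mul_fmod y (v.fmod m), Int.fmod_fmod,
    ← Int.mul_fmod, ← Int.mul_fmod, ← Int.add_fmod]

-- If the linear identity holds for the two current residues, it persists through the recurrence.
theorem pvFusedLoop_true (m cx cy : Int) : ∀ (k : Nat) (da db ca cb sa sb : Int),
    sa = (cx * da + cy * ca).fmod m → sb = (cx * db + cy * cb).fmod m →
    pvFusedLoop m cx cy (da, db) (ca, cb) (sa, sb) k = true := by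
  intro k
  induction k with
  | zero => intro _ _ _ _ _ _ _ _; rfl
  | succ k ih =>
    intro da db ca cb sa sb h1 h2
    simp only [pvFusedLoop, PySem.Int.mod]
    rw [if_neg (by simp [h1, h2])]
    refine ih db ((da + db).fmod m) cb ((ca + cb).fmod m) sb ((sa + sb).fmod m) h2 ?_
    rw [h1, h2, ← Int.add_fmod, pvFmodLin]
    ring_nf

-- One unrolling: for a positive length the whole fused pass is just the first comparison.
theorem pvFusedLoop_succ (m cx cy : Int) (k : Nat) (da db ca cb sa sb : Int) :
    pvFusedLoop m cx cy (da, db) (ca, cb) (sa, sb) (k + 1)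
      = (decide (sa = (cx * da + cy * ca).fmod m) && decide (sb = (cx * db + cy * cb).fmod m)) := by
  simp only [pvFusedLoop, PySem.Int.mod]
  by_cases h1 : sa = (cx * da + cy * ca).fmod m
  · by_cases h2 : sb = (cx * db + cy * cb).fmod m
    · rw [if_neg (by simp [h1, h2]),
        pvFusedLoop_true m cx cy k db ((da + db).fmod m) cb ((ca + cb).fmod m)
          sb ((sa + sb).fmod m) h2 (by rw [h1, h2, ← Int.add_fmod, pvFmodLin]; ring_nf),
        decide_eq_true h1, decide_eq_true h2]
      rfl
    · rw [if_pos (by simp [h2])]; simp [h2]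
  · rw [if_pos (by simp [h1])]; simp [h1]

-- ===== VERDICT =====
theorem verify_coefficients_spec : Claim_equal_verify_coefficients := by
  intro m gen_a gen_b start_i start_j coeff_x coeff_y seq_length _ _
  show verify_coefficients _ _ _ _ _ _ _ _ = _
  unfold verify_coefficients verify_coefficients_alt generate_sequence
  rw [PySem.List.pyRange_one]
  simp only [pvGenLoop_toList, List.nil_append]
  have h : (List.range (seq_length - 0).toNat).map (fun k => (0 : Int) + (k : Nat))
      = (List.range seq_length.toNat).map Int.ofNat := by
    simp [Int.ofNat_eq_natCast]
  rw [h, pvCheckLoop_eq_fused]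
  by_cases hle : seq_length ≤ 0
  · have : seq_length.toNat = 0 := by omega
    rw [this, if_pos hle]; rfl
  · obtain ⟨k, hk⟩ : ∃ k, seq_length.toNat = k + 1 := ⟨seq_length.toNat - 1, by omega⟩
    rw [hk, if_neg hle, pvFusedLoop_succ]
    simp only [PySem.Int.mod]
    congr 1
    · refine decide_eq_decide.mpr ?_
      rw [pvFmodLin coeff_x 1 coeff_y 1 m, Int.fmod_eq_fmod_iff_fmod_sub_eq_zero,
        show start_i - (coeff_x * 1 + coeff_y * 1) = start_i - coeff_x - coeff_y from by ring]
    · refine decide_eq_decide.mpr ?_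
      rw [pvFmodLin coeff_x gen_a coeff_y gen_b m, Int.fmod_eq_fmod_iff_fmod_sub_eq_zero,
        show start_j - (coeff_x * gen_a + coeff_y * gen_b)
          = start_j - coeff_x * gen_a - coeff_y * gen_b from by ring]
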